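-- pv_equiv track=rewrite | github.com/xuzhougeng/HCR_designer | scripts/probe_generator.py | filter_probe_by_polyN
-- ===== SOURCE A (Python) =====
-- from typing import List, Dict
--
-- def generate_odd_even_probes(seq, gap=0, odd_probe_size=25, even_probe_size=25):
--     odd_probe = seq[:odd_probe_size]
--     even_probe = seq[odd_probe_size + gap: odd_probe_size + gap + even_probe_size]
--
--     return odd_probe, even_probe
--
-- def filter_probe_by_polyN(probes, polyN=5, gap=0, odd_probe_size=25, even_probe_size=25) -> List[str]:
--     """根据多聚体N过滤探针
--     :param probes: 探针字典
--     :param polyN: 多聚体N的长度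
--     """
--     filtered_probes = {}
--     polyA = 'A' * polyN
--     polyT = 'T' * polyN
--     polyC = 'C' * polyN
--     polyG = 'G' * polyN
--
--     # 过滤探针字典
--     for pos, probe in probes.items():
--         probe = str(probe).upper()
--         odd_probe, even_probe = generate_odd_even_probes(probe, gap, odd_probe_size, even_probe_size)
--
--         # 当前探针中多聚体N的长度大于polyN时，则跳过
--         if polyA in odd_probe or polyT in odd_probe or polyC in odd_probe or polyG in odd_probe:
--             continue
--         if polyA in even_probe or polyT in even_probe or polyC in even_probe or polyG in even_probe:
--             continue
--
--         filtered_probes[pos] = probe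
--
--     return filtered_probes
-- ===== SOURCE B (Python) =====
-- def has_homopolymer(s, n):
--     """True iff s contains a run of >= n identical A/T/C/G characters.
--     For n <= 0 the empty poly-string matches everywhere, so always True."""
--     if n <= 0:
--         return True
--     prev = None
--     run = 0
--     for ch in s:
--         if ch == prev:
--             run += 1
--         else:
--             prev = ch
--             run = 1
--         if run >= n and ch in 'ATCG':
--             return True
--     return False
--
-- def filter_probe_by_polyN(probes, polyN=5, gap=0, odd_probe_size=25, even_probe_size=25):
--     return {
--         pos: probe
--         for pos, probe in ((pos, str(raw).upper()) for pos, raw in probes.items())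
--         if not (has_homopolymer(probe[:odd_probe_size], polyN)
--                 or has_homopolymer(probe[odd_probe_size + gap:
--                                          odd_probe_size + gap + even_probe_size], polyN))
--     }
-- ===== Notes on version B (the rewrite author's own statement) =====
-- stated objective: alternative
-- what changed: The four 'A'*n/'T'*n/'C'*n/'G'*n substring searches per slice are replaced by one single-pass run-length scan (tracking the previous character and the current run) that reports a homopolymer as soon as a run of >= polyN A/T/C/G characters is seen, and the filtering loop becomes a dict comprehension.
import Mathlib
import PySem

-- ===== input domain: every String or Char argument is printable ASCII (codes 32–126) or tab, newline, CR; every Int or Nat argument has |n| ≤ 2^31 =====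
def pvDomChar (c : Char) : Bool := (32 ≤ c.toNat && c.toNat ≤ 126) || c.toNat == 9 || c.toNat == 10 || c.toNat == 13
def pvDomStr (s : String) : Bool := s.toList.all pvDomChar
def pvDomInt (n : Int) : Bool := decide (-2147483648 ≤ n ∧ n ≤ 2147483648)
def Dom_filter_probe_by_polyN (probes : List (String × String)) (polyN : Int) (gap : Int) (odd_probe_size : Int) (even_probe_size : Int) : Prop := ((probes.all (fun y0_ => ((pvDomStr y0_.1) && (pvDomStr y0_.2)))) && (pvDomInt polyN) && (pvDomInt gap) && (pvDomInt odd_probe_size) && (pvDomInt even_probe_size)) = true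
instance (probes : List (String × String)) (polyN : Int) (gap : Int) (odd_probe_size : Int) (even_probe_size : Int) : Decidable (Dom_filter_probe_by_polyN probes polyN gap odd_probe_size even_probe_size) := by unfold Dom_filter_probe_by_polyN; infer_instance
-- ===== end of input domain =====

-- B replaces the four poly-N substring searches per slice by one single-pass run-length scan; return-value equivalence (A mutates nothing observable).
-- ===== PORT A =====
def generate_odd_even_probes (seq : String) (gap : Int) (odd_probe_size : Int) (even_probe_size : Int) : String × String :=
  let odd_probe := PySem.Str.slice seq none (some odd_probe_size)
  let even_probe := PySem.Str.slice seq (some (odd_probe_size + gap)) (some (odd_probe_size + gap + even_probe_size))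
  (odd_probe, even_probe)

def filter_probe_by_polyN (probes : List (String × String)) (polyN : Int) (gap : Int) (odd_probe_size : Int) (even_probe_size : Int) : List (String × String) :=
  -- 'A' * polyN is '' when polyN ≤ 0, hence the .toNat clamp is exact
  let polyA := String.ofList (List.replicate polyN.toNat 'A')
  let polyT := String.ofList (List.replicate polyN.toNat 'T')
  let polyC := String.ofList (List.replicate polyN.toNat 'C')
  let polyG := String.ofList (List.replicate polyN.toNat 'G')
  let filtered := ((PySem.Dict.ofList probes).items).foldl
    (fun (acc : PySem.Dict String String) (pp : String × String) =>
      let probe := PySem.Str.upper pp.2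
      let oe := generate_odd_even_probes probe gap odd_probe_size even_probe_size
      if PySem.Str.isIn polyA oe.1 || PySem.Str.isIn polyT oe.1 || PySem.Str.isIn polyC oe.1 || PySem.Str.isIn polyG oe.1 then acc
      else if PySem.Str.isIn polyA oe.2 || PySem.Str.isIn polyT oe.2 || PySem.Str.isIn polyC oe.2 || PySem.Str.isIn polyG oe.2 then acc
      else acc.insert pp.1 probe)
    PySem.Dict.empty
  filtered.items

-- ===== PORT B =====
-- the for-ch loop of has_homopolymer; 'ch in 'ATCG'' for a single char is exactly the 4-way comparison
def runScan (n : Nat) (prev : Option Char) (run : Nat) : List Char → Bool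
  | [] => false
  | c :: rest =>
    let run' := if some c == prev then run + 1 else 1
    if n ≤ run' && (c == 'A' || c == 'T' || c == 'C' || c == 'G') then true
    else runScan n (some c) run' rest

def has_homopolymer (s : String) (n : Int) : Bool :=
  if n ≤ 0 then true else runScan n.toNat none 0 s.toList

def filter_probe_by_polyN_alt (probes : List (String × String)) (polyN : Int) (gap : Int) (odd_probe_size : Int) (even_probe_size : Int) : List (String × String) :=
  (((PySem.Dict.ofList probes).items).map (fun pp => (pp.1, PySem.Str.upper pp.2))).filter
    (fun pp =>
      !(has_homopolymer (PySem.Str.slice pp.2 none (some odd_probe_size)) polyN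
        || has_homopolymer (PySem.Str.slice pp.2 (some (odd_probe_size + gap)) (some (odd_probe_size + gap + even_probe_size))) polyN))

-- ===== PRECONDITION & SPEC =====
def Spec_filter_probe_by_polyN (probes : List (String × String)) (polyN : Int) (gap : Int) (odd_probe_size : Int) (even_probe_size : Int) (out : List (String × String)) : Prop := out = filter_probe_by_polyN_alt probes polyN gap odd_probe_size even_probe_size
instance (probes : List (String × String)) (polyN : Int) (gap : Int) (odd_probe_size : Int) (even_probe_size : Int) (out : List (String × String)) : Decidable (Spec_filter_probe_by_polyN probes polyN gap odd_probe_size even_probe_size out) := by unfold Spec_filter_probe_by_polyN; infer_instance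

-- ===== CLAIM (what is proved, stated in full; the proofs are below) =====
def Claim_equal_filter_probe_by_polyN : Prop := ∀ (probes : List (String × String)) (polyN : Int) (gap : Int) (odd_probe_size : Int) (even_probe_size : Int), Dom_filter_probe_by_polyN probes polyN gap odd_probe_size even_probe_size → Spec_filter_probe_by_polyN probes polyN gap odd_probe_size even_probe_size (filter_probe_by_polyN probes polyN gap odd_probe_size even_probe_size)

-- ===== LEMMAS AND PROOFS =====
def atcg (c : Char) : Bool := c == 'A' || c == 'T' || c == 'C' || c == 'G'

-- starting a fresh run on d (the failed check says: no hit at d itself with run length 1)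
theorem fresh_step (n : Nat) (hn : 1 ≤ n) (d : Char) (rest : List Char)
    (h : ¬ (n ≤ 1 ∧ atcg d = true)) :
    (∃ c', atcg c' = true ∧ List.replicate n c' <:+: d :: rest) ↔
      ((atcg d = true ∧ ∃ k, 1 ≤ k ∧ n ≤ 1 + k ∧ List.replicate k d <+: rest) ∨
       (∃ c', atcg c' = true ∧ List.replicate n c' <:+: rest)) := by
  constructor
  · rintro ⟨c', hc', hinf⟩
    rcases List.infix_cons_iff.mp hinf with hpre | hinf'
    · obtain ⟨m, rfl⟩ : ∃ m, n = m + 1 := ⟨n - 1, by omega⟩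
      rw [List.replicate_succ, List.cons_prefix_cons] at hpre
      obtain ⟨rfl, hpre⟩ := hpre
      have hm : 1 ≤ m := by
        by_contra hm
        exact h ⟨by omega, hc'⟩
      exact Or.inl ⟨hc', m, hm, by omega, hpre⟩
    · exact Or.inr ⟨c', hc', hinf'⟩
  · rintro (⟨hd, k, hk1, hnk, hpre⟩ | ⟨c', hc', hinf⟩)
    · refine ⟨d, hd, List.IsPrefix.isInfix ?_⟩
      have h1 : List.replicate n d <+: List.replicate (k + 1) d := by
        refine ⟨List.replicate (k + 1 - n) d, ?_⟩
        rw [← List.replicate_add]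
        congr 1
        omega
      refine h1.trans ?_
      rw [List.replicate_succ, List.cons_prefix_cons]
      exact ⟨rfl, hpre⟩
    · exact ⟨c', hc', hinf.trans (List.suffix_cons d rest).isInfix⟩

-- invariant of the run-length scan while carrying a run of r copies of c
theorem runScan_invariant (n : Nat) (hn : 1 ≤ n) :
    ∀ (rest : List Char) (c : Char) (r : Nat), ¬ (n ≤ r ∧ atcg c = true) →
    (runScan n (some c) r rest = true ↔
      ((atcg c = true ∧ ∃ k, 1 ≤ k ∧ n ≤ r + k ∧ List.replicate k c <+: rest) ∨
       (∃ c', atcg c' = true ∧ List.replicate n c' <:+: rest))) := by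
  intro rest
  induction rest with
  | nil =>
    intro c r h
    simp only [runScan]
    constructor
    · intro hfalse; cases hfalse
    · rintro (⟨_, k, hk1, _, hpre⟩ | ⟨c', _, hinf⟩)
      · have := hpre.length_le
        simp [List.length_replicate] at this
        omega
      · have := hinf.length_le
        simp [List.length_replicate] at this
        omega
  | cons d rest' ih =>
    intro c r h
    by_cases hdc : d = c
    · subst hdc
      by_cases hchk : n ≤ r + 1 ∧ atcg d = true
      · have : runScan n (some d) r (d :: rest') = true := by
          simp only [runScan, beq_self_eq_true]
          have : (n ≤ r + 1 && (d == 'A' || d == 'T' || d == 'C' || d == 'G')) = true := by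
            have h2 := hchk.2
            simp only [atcg] at h2
            simp [hchk.1, h2]
          simp [this]
        rw [this]
        simp only [true_iff]
        exact Or.inl ⟨hchk.2, 1, le_refl 1, by omega, by
          simp [List.replicate_succ, List.cons_prefix_cons.mpr ⟨rfl, List.nil_prefix⟩]⟩
      · have hstep : runScan n (some d) r (d :: rest') = runScan n (some d) (r + 1) rest' := by
          simp only [runScan, beq_self_eq_true]
          have : (n ≤ r + 1 && (d == 'A' || d == 'T' || d == 'C' || d == 'G')) = false := by
            by_contra hb
            rw [Bool.not_eq_false, Bool.and_eq_true] at hb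
            exact hchk ⟨by exact_mod_cast of_decide_eq_true hb.1, by simpa [atcg] using hb.2⟩
          simp [this]
        rw [hstep, ih d (r + 1) hchk]
        constructor
        · rintro (⟨hd, k, hk1, hnk, hpre⟩ | ⟨c', hc', hinf⟩)
          · exact Or.inl ⟨hd, k + 1, by omega, by omega, by
              rw [List.replicate_succ, List.cons_prefix_cons]; exact ⟨rfl, hpre⟩⟩
          · exact Or.inr ⟨c', hc', hinf.trans (List.suffix_cons d rest').isInfix⟩
        · rintro (⟨hd, k, hk1, hnk, hpre⟩ | hright)
          · -- k ≥ 2 since n > r+1 when atcg d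
            have hk2 : 2 ≤ k := by
              by_contra hk2
              have : k = 1 := by omega
              subst this
              exact hchk ⟨by omega, hd⟩
            obtain ⟨m, rfl⟩ : ∃ m, k = m + 1 := ⟨k - 1, by omega⟩
            rw [List.replicate_succ, List.cons_prefix_cons] at hpre
            exact Or.inl ⟨hd, m, by omega, by omega, hpre.2⟩
          · rcases (fresh_step n hn d rest' (by
                intro hc; exact hchk ⟨by omega, hc.2⟩)).mp hright with hl | hr
            · obtain ⟨hd, k, hk1, hnk, hpre⟩ := hl
              -- run continues from the carry: same as left with r+1? no: need n ≤ r+1+k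
              exact Or.inl ⟨hd, k, hk1, by omega, hpre⟩
            · exact Or.inr hr
    · -- d ≠ c : run resets to 1
      by_cases hchk : n ≤ 1 ∧ atcg d = true
      · have hT : runScan n (some c) r (d :: rest') = true := by
          simp only [runScan]
          have hne : (some d == some c) = false := by
            simp [hdc]
          have h2 := hchk.2
          simp only [atcg] at h2
          simp [hne, hchk.1, h2]
        rw [hT]
        simp only [true_iff]
        refine Or.inr ⟨d, hchk.2, ?_⟩
        have : n = 1 := by omega
        subst this
        exact (List.cons_prefix_cons.mpr ⟨rfl, List.nil_prefix⟩ :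
          List.replicate 1 d <+: d :: rest').isInfix
      · have hstep : runScan n (some c) r (d :: rest') = runScan n (some d) 1 rest' := by
          simp only [runScan]
          have hne : (some d == some c) = false := by simp [hdc]
          have hb : (n ≤ 1 && (d == 'A' || d == 'T' || d == 'C' || d == 'G')) = false := by
            by_contra hb
            rw [Bool.not_eq_false, Bool.and_eq_true] at hb
            exact hchk ⟨by exact_mod_cast of_decide_eq_true hb.1, by simpa [atcg] using hb.2⟩
          simp [hne, hb]
        rw [hstep, ih d 1 hchk]
        constructor
        · intro hx
          exact Or.inr ((fresh_step n hn d rest' hchk).mpr hx)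
        · intro hmix
          rcases hmix with ⟨hc', k, hk1, hnk, hpre⟩ | ⟨c', hc', hinf⟩
          · -- a carried run of c cannot be a prefix of d :: rest'
            obtain ⟨m, rfl⟩ : ∃ m, k = m + 1 := ⟨k - 1, by omega⟩
            rw [List.replicate_succ, List.cons_prefix_cons] at hpre
            exact absurd hpre.1.symm hdc
          · exact (fresh_step n hn d rest' hchk).mp ⟨c', hc', hinf⟩

theorem runScan_start (n : Nat) (hn : 1 ≤ n) (s : List Char) :
    runScan n none 0 s = true ↔ ∃ c', atcg c' = true ∧ List.replicate n c' <:+: s := by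
  cases s with
  | nil =>
    simp only [runScan]
    constructor
    · intro hfalse; cases hfalse
    · rintro ⟨c', _, hinf⟩
      have := hinf.length_le
      simp [List.length_replicate] at this
      omega
  | cons d rest =>
    by_cases hchk : n ≤ 1 ∧ atcg d = true
    · have hT : runScan n none 0 (d :: rest) = true := by
        simp only [runScan]
        have h2 := hchk.2
        simp only [atcg] at h2
        simp [hchk.1, h2]
      rw [hT]
      simp only [true_iff]
      refine ⟨d, hchk.2, ?_⟩
      have : n = 1 := by omega
      subst this
      exact (List.cons_prefix_cons.mpr ⟨rfl, List.nil_prefix⟩ :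
        List.replicate 1 d <+: d :: rest).isInfix
    · have hstep : runScan n none 0 (d :: rest) = runScan n (some d) 1 rest := by
        simp only [runScan]
        have hb : (n ≤ 1 && (d == 'A' || d == 'T' || d == 'C' || d == 'G')) = false := by
          by_contra hb
          rw [Bool.not_eq_false, Bool.and_eq_true] at hb
          exact hchk ⟨by exact_mod_cast of_decide_eq_true hb.1, by simpa [atcg] using hb.2⟩
        simp [hb]
      rw [hstep, runScan_invariant n hn rest d 1 hchk, ← fresh_step n hn d rest hchk]

-- A's four substring tests equal B's scan, on any string
theorem checkEq (s : String) (polyN : Int) :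
    (PySem.Str.isIn (String.ofList (List.replicate polyN.toNat 'A')) s ||
     PySem.Str.isIn (String.ofList (List.replicate polyN.toNat 'T')) s ||
     PySem.Str.isIn (String.ofList (List.replicate polyN.toNat 'C')) s ||
     PySem.Str.isIn (String.ofList (List.replicate polyN.toNat 'G')) s) =
      has_homopolymer s polyN := by
  by_cases hle : polyN ≤ 0
  · have h0 : polyN.toNat = 0 := by omega
    simp [h0, has_homopolymer, hle, PySem.Str.isIn_eq, PySem.Chars.isIn_nil]
  · have hn : 1 ≤ polyN.toNat := by omega
    have hh : has_homopolymer s polyN = runScan polyN.toNat none 0 s.toList := by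
      simp [has_homopolymer, hle]
    rw [hh, Bool.eq_iff_iff]
    simp only [Bool.or_eq_true, PySem.Str.isIn_eq, PySem.Chars.isIn_iff_infix,
      String.toList_ofList]
    rw [runScan_start polyN.toNat hn s.toList]
    constructor
    · rintro (((hA | hT) | hC) | hG)
      · exact ⟨'A', by decide, hA⟩
      · exact ⟨'T', by decide, hT⟩
      · exact ⟨'C', by decide, hC⟩
      · exact ⟨'G', by decide, hG⟩
    · rintro ⟨c', hc', hinf⟩
      simp only [atcg, Bool.or_eq_true, beq_iff_eq] at hc'
      rcases hc' with ((rfl | rfl) | rfl) | rfl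
      · exact Or.inl (Or.inl (Or.inl hinf))
      · exact Or.inl (Or.inl (Or.inr hinf))
      · exact Or.inl (Or.inr hinf)
      · exact Or.inr hinf

-- the conditional dict-building fold is the filtered mapped list
theorem foldl_insert_items (f : String → String) (keep : String × String → Bool) :
    ∀ (l : List (String × String)) (acc : PySem.Dict String String),
    (l.map Prod.fst).Nodup → (∀ p ∈ l, acc.contains p.1 = false) →
    ((l.foldl (fun acc pp =>
        if keep (pp.1, f pp.2) then acc.insert pp.1 (f pp.2) else acc) acc).items
      = acc.items ++ (l.map (fun pp => (pp.1, f pp.2))).filter keep) := by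
  intro l
  induction l with
  | nil => intro acc _ _; simp
  | cons p l ih =>
    intro acc hnd hfree
    simp only [List.map_cons, List.nodup_cons] at hnd
    have hpfree : acc.contains p.1 = false := hfree p (List.mem_cons_self ..)
    by_cases hkeep : keep (p.1, f p.2) = true
    · have hfree' : ∀ q ∈ l, (acc.insert p.1 (f p.2)).contains q.1 = false := by
        intro q hq
        rw [PySem.Dict.contains_insert]
        have hne : q.1 ≠ p.1 := by
          intro he
          exact hnd.1 (he ▸ List.mem_map_of_mem hq)
        simp [hne, hfree q (List.mem_cons_of_mem _ hq)]
      simp only [List.foldl_cons, if_pos hkeep]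
      rw [ih (acc.insert p.1 (f p.2)) hnd.2 hfree',
        PySem.Dict.items_insert_of_not_contains _ _ hpfree]
      simp [hkeep]
    · have hfree' : ∀ q ∈ l, acc.contains q.1 = false := fun q hq =>
        hfree q (List.mem_cons_of_mem _ hq)
      simp only [List.foldl_cons, if_neg hkeep]
      rw [ih acc hnd.2 hfree']
      simp [hkeep]

-- ===== VERDICT (by name: the statement is the Claim_ definition above) =====
theorem filter_probe_by_polyN_spec : Claim_equal_filter_probe_by_polyN := by
  intro probes polyN gap odd_probe_size even_probe_size _
  unfold Spec_filter_probe_by_polyN filter_probe_by_polyN filter_probe_by_polyN_alt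
  dsimp only
  have hfun :
      (fun (acc : PySem.Dict String String) (pp : String × String) =>
        let probe := PySem.Str.upper pp.2
        let oe := generate_odd_even_probes probe gap odd_probe_size even_probe_size
        if PySem.Str.isIn (String.ofList (List.replicate polyN.toNat 'A')) oe.1 ||
            PySem.Str.isIn (String.ofList (List.replicate polyN.toNat 'T')) oe.1 ||
            PySem.Str.isIn (String.ofList (List.replicate polyN.toNat 'C')) oe.1 ||
            PySem.Str.isIn (String.ofList (List.replicate polyN.toNat 'G')) oe.1 then acc
        else if PySem.Str.isIn (String.ofList (List.replicate polyN.toNat 'A')) oe.2 ||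
            PySem.Str.isIn (String.ofList (List.replicate polyN.toNat 'T')) oe.2 ||
            PySem.Str.isIn (String.ofList (List.replicate polyN.toNat 'C')) oe.2 ||
            PySem.Str.isIn (String.ofList (List.replicate polyN.toNat 'G')) oe.2 then acc
        else acc.insert pp.1 probe) =
      (fun (acc : PySem.Dict String String) (pp : String × String) =>
        if (fun pq : String × String =>
              !(has_homopolymer (PySem.Str.slice pq.2 none (some odd_probe_size)) polyN
                || has_homopolymer (PySem.Str.slice pq.2 (some (odd_probe_size + gap))
                    (some (odd_probe_size + gap + even_probe_size))) polyN))
            (pp.1, PySem.Str.upper pp.2) then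
          acc.insert pp.1 (PySem.Str.upper pp.2)
        else acc) := by
    funext acc pp
    simp only [generate_odd_even_probes, checkEq]
    by_cases hb1 : has_homopolymer
        (PySem.Str.slice (PySem.Str.upper pp.2) none (some odd_probe_size)) polyN = true <;>
      by_cases hb2 : has_homopolymer
          (PySem.Str.slice (PySem.Str.upper pp.2) (some (odd_probe_size + gap))
            (some (odd_probe_size + gap + even_probe_size))) polyN = true <;>
      simp_all
  rw [hfun, foldl_insert_items (PySem.Str.upper)
      (fun pq : String × String =>
        !(has_homopolymer (PySem.Str.slice pq.2 none (some odd_probe_size)) polyN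
          || has_homopolymer (PySem.Str.slice pq.2 (some (odd_probe_size + gap))
              (some (odd_probe_size + gap + even_probe_size))) polyN))
      ((PySem.Dict.ofList probes).items)
      PySem.Dict.empty
      (by simpa [PySem.Dict.keys] using PySem.Dict.nodup_keys_ofList probes)
      (by intro p _; simp)]
  simp [PySem.Dict.empty]
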